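-- pv_equiv track=rewrite | github.com/KimPopsong/PROGRAMMERS | 42587.py | solution
-- ===== SOURCE A (Python) =====
-- from collections import deque
-- import heapq, copy
--
-- def solution(priorities, location):
--     excuteTime = 0
--
--     heap = []  # 최대 힙
--     for item in priorities:
--         heapq.heappush(heap, (-item, item))
--
--     pQ = deque()
--
--     for i in range(len(priorities)):  # [처음 위치, 우선순위] 큐
--         pQ.append([i, priorities[i]])
--
--     while (len(heap)):
--         process = heapq.heappop(heap)[1]  # 실행해야하는 프로세스
--
--         while (len(pQ)):
--             p = pQ.popleft()
--
--             if (p[1] == process):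
--                 excuteTime = excuteTime + 1
--
--                 if (p[0] == location):
--                     return excuteTime
--
--                 else:
--                     break
--
--             pQ.append(p)
--
--     return excuteTime
-- ===== SOURCE B (Python) =====
-- def solution(priorities, location):
--     q = list(enumerate(priorities))
--     time = 0
--     while q:
--         m = max(p for _, p in q)
--         while q[0][1] != m:
--             q.append(q.pop(0))
--         time += 1
--         i, _ = q.pop(0)
--         if i == location:
--             return time
--     return time
-- ===== Notes on version B (the rewrite author's own statement) =====
-- stated objective: simpler
-- what changed: B drops A's max-heap and the separate priority-matching scan entirely: it keeps one queue of (index, priority) pairs and repeatedly rotates it until the front holds the current maximum priority, then prints it - the classic single-queue printer simulation.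
import Mathlib
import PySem

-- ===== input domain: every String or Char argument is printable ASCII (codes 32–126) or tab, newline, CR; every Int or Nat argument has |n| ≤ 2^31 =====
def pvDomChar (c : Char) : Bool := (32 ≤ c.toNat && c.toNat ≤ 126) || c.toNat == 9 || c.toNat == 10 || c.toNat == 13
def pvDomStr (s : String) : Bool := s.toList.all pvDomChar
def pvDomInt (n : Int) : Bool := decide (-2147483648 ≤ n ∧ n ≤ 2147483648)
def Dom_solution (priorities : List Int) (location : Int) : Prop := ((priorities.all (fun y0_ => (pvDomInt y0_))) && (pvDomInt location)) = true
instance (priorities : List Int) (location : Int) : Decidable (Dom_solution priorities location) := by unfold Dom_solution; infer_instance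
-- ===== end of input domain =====

-- B replaces A's heap + matching-scan machinery by the classic single-queue simulation
-- (rotate until the front holds the current maximum, then print); same cost, simpler code.

-- ===== PORT A =====
-- Python tuple comparison (lexicographic) on the (-(priority), priority) pairs A pushes.
def pairMin (p q : Int × Int) : Int × Int :=
  if p.1 < q.1 ∨ (p.1 = q.1 ∧ p.2 ≤ q.2) then p else q

-- heapq.heappop on A's heap: removes and returns the minimum pair.  Exact as a container:
-- equal keys are identical tuples here, so the popped value and the remaining multiset
-- coincide with heapq's regardless of heapq's internal array layout.
def heapPop (h : List (Int × Int)) : (Int × Int) × List (Int × Int) :=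
  match h with
  | [] => ((0, 0), [])  -- unreachable: A pops only while len(heap) > 0
  | x :: xs => let mp := xs.foldl pairMin x; (mp, (x :: xs).erase mp)

-- A's inner 'while len(pQ)' loop.  Fuel = queue length: the popped process value is always
-- present in the queue (heap and queue hold the same priorities), so the first match is
-- found before the fuel runs out; on a matchless queue Python would loop forever.
def scanQ : Nat → List (Int × Int) → Int → Int → Int → Option Int × List (Int × Int) × Int
  | _, [], _, _, t => (none, [], t)
  | 0, q, _, _, t => (none, q, t)
  | f + 1, p :: rest, process, location, t =>
      if p.2 = process then
        if p.1 = location then (some (t + 1), rest, t + 1)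
        else (none, rest, t + 1)
      else scanQ f (rest ++ [p]) process location t

-- A's outer 'while len(heap)' loop.  Fuel = initial heap size, exact: every iteration
-- pops exactly one heap element.
def aLoop : Nat → List (Int × Int) → Int → List (Int × Int) → Int → Int
  | _, [], _, _, t => t
  | 0, _, _, _, t => t  -- unreachable: fuel = initial heap size ≥ number of pops
  | f + 1, x :: xs, location, q, t =>
      let pop := heapPop (x :: xs)
      match scanQ q.length q pop.1.2 location t with
      | (some ans, _, _) => ans
      | (none, q', t') => aLoop f pop.2 location q' t'

def solution (priorities : List Int) (location : Int) : Int :=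
  let heap := priorities.foldl (fun h item => h ++ [(-item, item)]) []
  let pQ := (PySem.List.pyRange 0 (PySem.List.len priorities) 1).map
              (fun i => (i, PySem.List.pyGetD priorities i 0))  -- i ∈ range(len): in range, exact
  aLoop heap.length heap location pQ 0

-- ===== PORT B =====
-- 'while q[0][1] != m: q.append(q.pop(0))'.  Fuel = queue length: m is the maximum of the
-- queue's priorities, hence a matching front appears within one full sweep.
def rotQ : Nat → List (Int × Int) → Int → List (Int × Int)
  | _, [], _ => []
  | 0, q, _ => q
  | f + 1, p :: rest, m => if p.2 = m then p :: rest else rotQ f (rest ++ [p]) m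

-- B's 'while q' loop.  Fuel = initial queue length, exact: every iteration prints one job.
def bLoop : Nat → List (Int × Int) → Int → Int → Int
  | _, [], _, t => t
  | 0, _, _, t => t  -- unreachable: fuel = initial queue length ≥ number of prints
  | f + 1, x :: xs, location, t =>
      let m := xs.foldl (fun acc p => max acc p.2) x.2   -- max(p for _, p in q)
      match rotQ (x :: xs).length (x :: xs) m with
      | [] => t        -- unreachable: rotQ preserves the length
      | e :: rest => if e.1 = location then t + 1 else bLoop f rest location (t + 1)

def solution_alt (priorities : List Int) (location : Int) : Int :=
  bLoop (PySem.List.enumerate priorities 0).length (PySem.List.enumerate priorities 0) location 0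

-- ===== PRECONDITION & SPEC =====
def Spec_solution (priorities : List Int) (location : Int) (out : Int) : Prop := out = solution_alt priorities location
instance (priorities : List Int) (location : Int) (out : Int) : Decidable (Spec_solution priorities location out) := by unfold Spec_solution; infer_instance

-- ===== CLAIM (what is proved, stated in full; the proofs are below) =====
def Claim_equal_solution : Prop := ∀ (priorities : List Int) (location : Int), Dom_solution priorities location → Spec_solution priorities location (solution priorities location)

-- ===== LEMMAS AND PROOFS =====

theorem pairMin_neg (a b : Int) :
    pairMin (-a, a) (-b, b) = (-(max a b), max a b) := by
  unfold pairMin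
  split <;> simp only [Prod.mk.injEq] <;> constructor <;> omega

-- the lexicographic minimum of A's (-x, x) pairs carries the maximum priority
theorem foldl_pairMin_eq (xs : List (Int × Int)) (x : Int × Int)
    (hx : x.1 = -x.2) (hxs : ∀ p ∈ xs, p.1 = -p.2) :
    xs.foldl pairMin x =
      (-(xs.foldl (fun acc p => max acc p.2) x.2), xs.foldl (fun acc p => max acc p.2) x.2) := by
  induction xs generalizing x with
  | nil =>
      simp only [List.foldl_nil]
      exact Prod.ext (by omega) rfl
  | cons y ys ih =>
      have hy : y.1 = -y.2 := hxs y (by simp)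
      have hx' : x = (-x.2, x.2) := Prod.ext (by omega) rfl
      have hy' : y = (-y.2, y.2) := Prod.ext (by omega) rfl
      simp only [List.foldl_cons]
      rw [hx', hy', pairMin_neg]
      rw [ih (-(max x.2 y.2), max x.2 y.2) (by simp) (fun p hp => hxs p (by simp [hp]))]

-- two fold-maxima over permutation-equal nonempty lists agree
theorem foldl_max_perm (a b : Int) (t s : List Int) (hp : (a :: t).Perm (b :: s)) :
    t.foldl max a = s.foldl max b := by
  have hat := PySem.List.le_foldl_max t a
  have hbs := PySem.List.le_foldl_max s b
  have hmemA : t.foldl max a ∈ a :: t := by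
    rcases PySem.List.foldl_max_mem t a with h | h
    · simp [h]
    · simp [h]
  have hmemB : s.foldl max b ∈ b :: s := by
    rcases PySem.List.foldl_max_mem s b with h | h
    · simp [h]
    · simp [h]
  have h1 : t.foldl max a ≤ s.foldl max b := by
    rcases List.mem_cons.mp (hp.mem_iff.mp hmemA) with h | h
    · rw [h]; exact hbs.1
    · exact hbs.2 _ h
  have h2 : s.foldl max b ≤ t.foldl max a := by
    rcases List.mem_cons.mp (hp.symm.mem_iff.mp hmemB) with h | h
    · rw [h]; exact hat.1
    · exact hat.2 _ h
  omega

theorem foldl_maxsnd_eq (xs : List (Int × Int)) (a : Int) :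
    xs.foldl (fun acc p => max acc p.2) a = (xs.map Prod.snd).foldl max a := by
  induction xs generalizing a with
  | nil => rfl
  | cons y ys ih => simp [List.foldl_cons, ih]

-- erasing the popped (-m, m) pair erases one m from the priority multiset
theorem map_snd_erase_neg (h : List (Int × Int)) (m : Int) (hf : ∀ p ∈ h, p.1 = -p.2) :
    ((h.erase (-m, m)).map Prod.snd) = (h.map Prod.snd).erase m := by
  induction h with
  | nil => simp
  | cons p t ih =>
      have hp1 : p.1 = -p.2 := hf p (by simp)
      by_cases hpm : p = (-m, m)
      · subst hpm
        simp [List.erase_cons_head]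
      · have hp2 : p.2 ≠ m := by
          intro hc
          exact hpm (Prod.ext (by omega) hc)
        rw [List.erase_cons_tail (by simp [hpm]), List.map_cons, List.map_cons,
            List.erase_cons_tail (by simp [hp2]),
            ih (fun q hq => hf q (by simp [hq]))]

-- any queue containing priority m splits at its first m-entry
theorem exists_first_match (q : List (Int × Int)) (m : Int) (hm : ∃ p ∈ q, p.2 = m) :
    ∃ a e b, q = a ++ e :: b ∧ e.2 = m ∧ ∀ p ∈ a, p.2 ≠ m := by
  induction q with
  | nil => simp at hm
  | cons x t ih =>
      by_cases hx : x.2 = m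
      · exact ⟨[], x, t, by simp, hx, by simp⟩
      · obtain ⟨p, hp, hpm⟩ := hm
        rcases List.mem_cons.mp hp with rfl | hp'
        · exact absurd hpm hx
        · obtain ⟨a, e, b, hq, he, ha⟩ := ih ⟨p, hp', hpm⟩
          exact ⟨x :: a, e, b, by simp [hq], he,
            fun p hp => by rcases List.mem_cons.mp hp with rfl | h; exact hx; exact ha p h⟩

-- A's inner loop on a decomposed queue: removes the first m-entry, rotates its prefix back
theorem scanQ_spec (m loc : Int) (a : List (Int × Int)) :
    ∀ (f : Nat) (b : List (Int × Int)) (e : Int × Int) (t : Int),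
    (∀ p ∈ a, p.2 ≠ m) → e.2 = m → a.length < f →
    scanQ f (a ++ e :: b) m loc t =
      (if e.1 = loc then some (t + 1) else none, b ++ a, t + 1) := by
  induction a with
  | nil =>
      intro f b e t _ he hf
      match f with
      | g + 1 =>
          simp only [List.nil_append, scanQ]
          rw [if_pos he]
          by_cases hl : e.1 = loc <;> simp [hl]
  | cons p a' ih =>
      intro f b e t ha he hf
      match f with
      | g + 1 =>
          have hp : p.2 ≠ m := ha p (by simp)
          have harr1 : (p :: a') ++ e :: b = p :: (a' ++ e :: b) := by simp
          rw [harr1]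
          simp only [scanQ, if_neg hp]
          have harr : (a' ++ e :: b) ++ [p] = a' ++ e :: (b ++ [p]) := by simp
          rw [harr, ih g (b ++ [p]) e t (fun q hq => ha q (by simp [hq])) he (by simp at hf ⊢; omega)]
          simp

-- B's rotation on a decomposed queue
theorem rotQ_spec (m : Int) (a : List (Int × Int)) :
    ∀ (f : Nat) (b : List (Int × Int)) (e : Int × Int),
    (∀ p ∈ a, p.2 ≠ m) → e.2 = m → a.length < f →
    rotQ f (a ++ e :: b) m = e :: (b ++ a) := by
  induction a with
  | nil =>
      intro f b e _ he hf
      match f with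
      | g + 1 => simp [rotQ, he]
  | cons p a' ih =>
      intro f b e ha he hf
      match f with
      | g + 1 =>
          have hp : p.2 ≠ m := ha p (by simp)
          have harr1 : (p :: a') ++ e :: b = p :: (a' ++ e :: b) := by simp
          rw [harr1]
          simp only [rotQ, if_neg hp]
          have harr : (a' ++ e :: b) ++ [p] = a' ++ e :: (b ++ [p]) := by simp
          rw [harr, ih g (b ++ [p]) e (fun q hq => ha q (by simp [hq])) he (by simp at hf ⊢; omega)]
          simp

theorem foldl_pairMin_mem (xs : List (Int × Int)) (x : Int × Int) :
    xs.foldl pairMin x ∈ x :: xs := by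
  induction xs generalizing x with
  | nil => simp
  | cons y ys ih =>
      have hpm : pairMin x y = x ∨ pairMin x y = y := by
        unfold pairMin; split <;> simp
      rcases List.mem_cons.mp (ih (pairMin x y)) with h | h
      · rcases hpm with h2 | h2 <;> rw [h2] at h <;> simp [List.foldl_cons, h2, h]
      · simp only [List.foldl_cons]
        exact List.mem_cons.mpr (Or.inr (List.mem_cons.mpr (Or.inr h)))

-- main induction: with the heap holding exactly the queue's priorities (as (-x, x) pairs),
-- A's heap-driven loop and B's max-rotation loop run in lock-step
theorem main_loop (n : Nat) :
    ∀ (heap q : List (Int × Int)) (loc t : Int), q.length = n → heap.length = n →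
    (heap.map Prod.snd).Perm (q.map Prod.snd) → (∀ p ∈ heap, p.1 = -p.2) →
    aLoop n heap loc q t = bLoop n q loc t := by
  induction n with
  | zero =>
      intro heap q loc t hlq hlh _ _
      rw [List.length_eq_zero_iff.mp hlq, List.length_eq_zero_iff.mp hlh]
      rfl
  | succ n ih =>
      intro heap q loc t hlq hlh hperm hform
      match q, heap with
      | qx :: qxs, hx :: hxs =>
          set mh := hxs.foldl (fun acc p => max acc p.2) hx.2 with hmh
          set mq := qxs.foldl (fun acc p => max acc p.2) qx.2 with hmq
          have hxform : hx.1 = -hx.2 := hform hx (by simp)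
          have hpop : hxs.foldl pairMin hx = (-mh, mh) :=
            foldl_pairMin_eq hxs hx hxform (fun p hp => hform p (by simp [hp]))
          have hperm' : (hx.2 :: hxs.map Prod.snd).Perm (qx.2 :: qxs.map Prod.snd) := by
            simpa using hperm
          have hmeq : mh = mq := by
            rw [hmh, hmq, foldl_maxsnd_eq, foldl_maxsnd_eq]
            exact foldl_max_perm _ _ _ _ hperm'
          have hmq' : mq = (qxs.map Prod.snd).foldl max qx.2 := by
            rw [hmq, foldl_maxsnd_eq]
          have hmem : ∃ p ∈ qx :: qxs, p.2 = mq := by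
            rcases PySem.List.foldl_max_mem (qxs.map Prod.snd) qx.2 with h | h
            · exact ⟨qx, by simp, by rw [hmq']; exact h.symm⟩
            · obtain ⟨p, hp, hp2⟩ := List.mem_map.mp h
              exact ⟨p, by simp [hp], by rw [hmq']; exact hp2⟩
          obtain ⟨a, e, b, hqeq, he, ha⟩ := exists_first_match _ mq hmem
          have hflen : a.length < (qx :: qxs).length := by
            rw [hqeq]; simp
          have hscan : scanQ (qx :: qxs).length (qx :: qxs) mq loc t =
              (if e.1 = loc then some (t + 1) else none, b ++ a, t + 1) := by
            rw [hqeq] at hflen ⊢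
            exact scanQ_spec mq loc a _ b e t ha he hflen
          have hrot : rotQ (qx :: qxs).length (qx :: qxs) mq = e :: (b ++ a) := by
            rw [hqeq] at hflen ⊢
            exact rotQ_spec mq a _ b e ha he hflen
          simp only [aLoop, bLoop, heapPop, hpop, hmeq, ← hmq, hscan, hrot]
          by_cases hloc : e.1 = loc
          · simp [hloc]
          · simp only [hloc, ite_false]
            -- both recurse: re-establish the invariant
            have hmpmem : (-mq, mq) ∈ hx :: hxs := by
              have := foldl_pairMin_mem hxs hx
              rw [hpop, hmeq] at this
              exact this
            have herase : ((hx :: hxs).erase (-mq, mq)).map Prod.snd =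
                ((hx :: hxs).map Prod.snd).erase mq :=
              map_snd_erase_neg _ mq hform
            have hqerase : ((qx :: qxs).map Prod.snd).erase mq =
                a.map Prod.snd ++ b.map Prod.snd := by
              have hnotm : mq ∉ a.map Prod.snd := by
                intro hc
                obtain ⟨p, hp, hp2⟩ := List.mem_map.mp hc
                exact ha p hp hp2
              rw [hqeq, List.map_append, List.map_cons,
                  List.erase_append_right _ hnotm, he, List.erase_cons_head]
            have hpermNew : (((hx :: hxs).erase (-mq, mq)).map Prod.snd).Perm
                ((b ++ a).map Prod.snd) := by
              rw [herase]
              refine (hperm.erase mq).trans ?_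
              rw [hqerase, List.map_append]
              exact List.perm_append_comm
            have hformNew : ∀ p ∈ (hx :: hxs).erase (-mq, mq), p.1 = -p.2 :=
              fun p hp => hform p (List.mem_of_mem_erase hp)
            have hlenBA : (b ++ a).length = n := by
              rw [hqeq] at hlq
              simp at hlq ⊢
              omega
            have hlenE : ((hx :: hxs).erase (-mq, mq)).length = n := by
              rw [List.length_erase_of_mem hmpmem]
              simp only [List.length_cons] at hlh ⊢
              omega
            exact ih _ _ loc (t + 1) hlenBA hlenE hpermNew hformNew

-- ===== VERDICT (by name: the statement is the Claim_ definition above) =====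
theorem solution_spec : Claim_equal_solution := by
  unfold Claim_equal_solution Spec_solution
  intro priorities location _
  unfold solution solution_alt
  have hheap : priorities.foldl (fun h item => h ++ [(-item, item)]) [] =
      priorities.map (fun x => (-x, x)) := by
    simpa using PySem.List.foldl_append_singleton_eq_map
      (f := fun x => ((-x : Int), x)) (l := priorities) (acc := [])
  have hpq : (PySem.List.pyRange 0 (PySem.List.len priorities) 1).map
      (fun i => (i, PySem.List.pyGetD priorities i 0)) = PySem.List.enumerate priorities 0 :=
    (PySem.List.enumerate_eq_map_pyRange (xs := priorities) (d := 0)).symm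
  rw [hheap, hpq]
  show aLoop (List.map (fun x => ((-x : Int), x)) priorities).length
      (List.map (fun x => ((-x : Int), x)) priorities) location
      (PySem.List.enumerate priorities 0) 0 =
    bLoop (PySem.List.enumerate priorities 0).length
      (PySem.List.enumerate priorities 0) location 0
  have hlen : (List.map (fun x => ((-x : Int), x)) priorities).length =
      (PySem.List.enumerate priorities 0).length := by
    rw [List.length_map, PySem.List.length_enumerate]
  rw [hlen]
  apply main_loop
  · rfl
  · exact hlen
  · have h2 : (PySem.List.enumerate priorities 0).map Prod.snd = priorities :=
      PySem.List.map_snd_enumerate priorities 0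
    rw [List.map_map, h2]
    have h1 : (Prod.snd ∘ fun x => ((-x : Int), x)) = id := by funext x; rfl
    rw [h1, List.map_id]
  · intro p hp
    obtain ⟨x, _, hx⟩ := List.mem_map.mp hp
    rw [← hx]
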